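-- pv_equiv track=rewrite | github.com/JisooByun/codingtest-study | jisoo/programmers/level1/모의고사.py | solution
-- ===== SOURCE A (Python) =====
-- def solution(answers):
--   answe = []
--   count = {
--     1: 0,
--     2: 0,
--     3: 0
--   }
--   s1 = [1, 2, 3, 4, 5]
--   s2 = [2, 1, 2, 3, 2, 4, 2, 5]
--   s3 = [3, 3, 1, 1, 2, 2, 4, 4, 5, 5]
--   for index, answer in enumerate(answers):
--     i = index % len(s1)
--     if s1[i] == answer:
--       count[1] += 1
--     i = index % len(s2)
--     if s2[i] == answer:
--       count[2] += 1
--     i = index % len(s3)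
--     if s3[i] == answer:
--       count[3] += 1
--   v = list(count.values())
--   for key in [1, 2, 3]:
--     if count[key] == max(v):
--       answe.append(key)
--   return answe
-- ===== SOURCE B (Python) =====
-- def solution(answers):
--     # Histogram of (position mod 40, answer) pairs; 40 = lcm(5, 8, 10), so the
--     # residue mod 40 determines each pattern's guess at that position.
--     hist = {}
--     for i, a in enumerate(answers):
--         key = (i % 40, a)
--         hist[key] = hist.get(key, 0) + 1
--     patterns = [
--         [1, 2, 3, 4, 5],
--         [2, 1, 2, 3, 2, 4, 2, 5],
--         [3, 3, 1, 1, 2, 2, 4, 4, 5, 5],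
--     ]
--     scores = [sum(hist.get((r, p[r % len(p)]), 0) for r in range(40))
--               for p in patterns]
--     m = max(scores)
--     return [k + 1 for k in range(3) if scores[k] == m]
-- ===== Notes on version B (the rewrite author's own statement) =====
-- stated objective: alternative
-- what changed: Replaces A's per-element comparison against the three patterns (three-key dict updated with modular indexing in one pass) by a histogram algorithm: build a dict counting (index mod 40, answer) pairs (40 = lcm of the pattern lengths), then each pattern's score is an aggregation of the histogram over the 40 residues; winners are selected from the scores list by max.
import Mathlib
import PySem

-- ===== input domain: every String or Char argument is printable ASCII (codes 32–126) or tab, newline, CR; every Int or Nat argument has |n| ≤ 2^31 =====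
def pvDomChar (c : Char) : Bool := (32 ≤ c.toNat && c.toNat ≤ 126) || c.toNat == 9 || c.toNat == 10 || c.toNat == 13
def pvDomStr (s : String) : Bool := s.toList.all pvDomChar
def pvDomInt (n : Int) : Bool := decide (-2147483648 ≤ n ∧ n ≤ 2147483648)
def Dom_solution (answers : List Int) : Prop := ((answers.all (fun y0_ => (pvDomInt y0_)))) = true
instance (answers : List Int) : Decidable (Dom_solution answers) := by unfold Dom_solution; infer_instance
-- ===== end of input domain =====

-- B replaces A's per-element comparison against the three patterns by a histogram of
-- (index mod 40, answer) pairs aggregated over the 40 residues (objective: alternative).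

-- ===== PORT A =====
def pvS1 : List Int := [1, 2, 3, 4, 5]
def pvS2 : List Int := [2, 1, 2, 3, 2, 4, 2, 5]
def pvS3 : List Int := [3, 3, 1, 1, 2, 2, 4, 4, 5, 5]

-- one iteration of A's for-loop body; s[i] with i = index % len(s) is always in
-- range, so pyGetD with default 0 is exact; count[k] += 1 = insert k (lookup + 1)
def pvStepA (d : PySem.Dict Int Int) (p : Int × Int) : PySem.Dict Int Int :=
  let d1 := if PySem.List.pyGetD pvS1 (PySem.Int.mod p.1 5) 0 = p.2 then
              d.insert 1 (d.getD 1 0 + 1) else d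
  let d2 := if PySem.List.pyGetD pvS2 (PySem.Int.mod p.1 8) 0 = p.2 then
              d1.insert 2 (d1.getD 2 0 + 1) else d1
  if PySem.List.pyGetD pvS3 (PySem.Int.mod p.1 10) 0 = p.2 then
    d2.insert 3 (d2.getD 3 0 + 1) else d2

def solution (answers : List Int) : List Int :=
  let count := PySem.Dict.ofList [((1 : Int), (0 : Int)), (2, 0), (3, 0)]
  let count := (PySem.List.enumerate answers 0).foldl pvStepA count
  let v := count.values
  -- max(v): v always has length 3, so max? is some; getD 0 is never used
  [(1 : Int), 2, 3].foldl
    (fun answe key =>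
      if count.getD key 0 = (PySem.List.max? v (fun x => x)).getD 0 then
        answe ++ [key] else answe) []

-- ===== PORT B =====
-- hist[key] = hist.get(key, 0) + 1 is insert key (getD key 0 + 1)
def solution_alt (answers : List Int) : List Int :=
  -- Source B's 'key' variable is inlined: key = (i % 40, a)
  let hist := (PySem.List.enumerate answers 0).foldl
    (fun d q =>
      d.insert (PySem.Int.mod q.1 40, q.2)
        (d.getD (PySem.Int.mod q.1 40, q.2) 0 + 1))
    (PySem.Dict.empty : PySem.Dict (Int × Int) Int)
  let scores := [pvS1, pvS2, pvS3].map (fun p =>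
    ((PySem.List.pyRange 0 40 1).map (fun r =>
      hist.getD (r, PySem.List.pyGetD p (PySem.Int.mod r (p.length : Int)) 0) 0)).sum)
  let m := (PySem.List.max? scores (fun x => x)).getD 0
  (PySem.List.pyRange 0 3 1).foldl
    (fun acc k => if PySem.List.pyGetD scores k 0 = m then acc ++ [k + 1] else acc) []

-- ===== PRECONDITION & SPEC =====
def Spec_solution (answers : List Int) (out : List Int) : Prop := out = solution_alt answers
instance (answers : List Int) (out : List Int) : Decidable (Spec_solution answers out) := by unfold Spec_solution; infer_instance

-- ===== CLAIM (what is proved, stated in full; the proofs are below) =====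
def Claim_equal_solution : Prop := ∀ (answers : List Int), Dom_solution answers → Spec_solution answers (solution answers)

-- ===== LEMMAS AND PROOFS =====

-- common characterisation: number of hits of pattern p against ans, cursor j
def pvCnt (p : List Int) (j : Nat) : List Int → Int
  | [] => 0
  | a :: t => (if p.getD j 0 = a then 1 else 0) + pvCnt p ((j + 1) % p.length) t

-- ----- A-side lemmas -----
theorem pvIns1 (x y z v : Int) : (PySem.Dict.mk [((1 : Int), x), (2, y), (3, z)]).insert 1 v =
    PySem.Dict.mk [(1, v), (2, y), (3, z)] := by
  apply PySem.Dict.ext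
  rw [PySem.Dict.items_insert_of_contains] <;> try simp [PySem.Dict.contains_mk]

theorem pvIns2 (x y z v : Int) : (PySem.Dict.mk [((1 : Int), x), (2, y), (3, z)]).insert 2 v =
    PySem.Dict.mk [(1, x), (2, v), (3, z)] := by
  apply PySem.Dict.ext
  rw [PySem.Dict.items_insert_of_contains] <;> try simp [PySem.Dict.contains_mk]

theorem pvIns3 (x y z v : Int) : (PySem.Dict.mk [((1 : Int), x), (2, y), (3, z)]).insert 3 v =
    PySem.Dict.mk [(1, x), (2, y), (3, v)] := by
  apply PySem.Dict.ext
  rw [PySem.Dict.items_insert_of_contains] <;> try simp [PySem.Dict.contains_mk]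

theorem pvGetd1 (x y z : Int) : (PySem.Dict.mk [((1 : Int), x), (2, y), (3, z)]).getD 1 0 = x := by
  simp [PySem.Dict.getD, PySem.Dict.get?_mk_cons]

theorem pvGetd2 (x y z : Int) : (PySem.Dict.mk [((1 : Int), x), (2, y), (3, z)]).getD 2 0 = y := by
  simp [PySem.Dict.getD, PySem.Dict.get?_mk_cons]

theorem pvGetd3 (x y z : Int) : (PySem.Dict.mk [((1 : Int), x), (2, y), (3, z)]).getD 3 0 = z := by
  simp [PySem.Dict.getD, PySem.Dict.get?_mk_cons]

theorem pvVals (x y z : Int) : (PySem.Dict.mk [((1 : Int), x), (2, y), (3, z)]).values = [x, y, z] := by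
  simp [PySem.Dict.values_mk]

theorem pvOfl : PySem.Dict.ofList [((1 : Int), (0 : Int)), (2, 0), (3, 0)] =
    PySem.Dict.mk [(1, 0), (2, 0), (3, 0)] := by decide

theorem pvMod5 (k : Nat) : PySem.Int.mod (k : Int) 5 = ((k % 5 : Nat) : Int) := by
  exact_mod_cast PySem.Int.mod_natCast k 5

theorem pvMod8 (k : Nat) : PySem.Int.mod (k : Int) 8 = ((k % 8 : Nat) : Int) := by
  exact_mod_cast PySem.Int.mod_natCast k 8

theorem pvMod10 (k : Nat) : PySem.Int.mod (k : Int) 10 = ((k % 10 : Nat) : Int) := by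
  exact_mod_cast PySem.Int.mod_natCast k 10

theorem pvStepA_fold (ans : List Int) :
    ∀ (k : Nat) (x y z : Int),
    ((PySem.List.enumerate ans (k : Int)).foldl pvStepA
        (PySem.Dict.mk [((1 : Int), x), (2, y), (3, z)])) =
      PySem.Dict.mk [(1, x + pvCnt pvS1 (k % 5) ans),
                     (2, y + pvCnt pvS2 (k % 8) ans),
                     (3, z + pvCnt pvS3 (k % 10) ans)] := by
  induction ans with
  | nil => intro k x y z; simp [PySem.List.enumerate_nil, pvCnt]
  | cons a t ih =>
    intro k x y z
    rw [PySem.List.enumerate_cons]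
    simp only [List.foldl_cons]
    have hstep : pvStepA (PySem.Dict.mk [((1 : Int), x), (2, y), (3, z)]) ((k : Int), a) =
        PySem.Dict.mk [(1, x + if pvS1.getD (k % 5) 0 = a then 1 else 0),
                       (2, y + if pvS2.getD (k % 8) 0 = a then 1 else 0),
                       (3, z + if pvS3.getD (k % 10) 0 = a then 1 else 0)] := by
      unfold pvStepA
      rw [pvMod5 k, pvMod8 k, pvMod10 k]
      simp only [PySem.List.pyGetD_natCast]
      split_ifs <;>
        (try simp only [pvGetd1, pvIns1, pvGetd2, pvIns2, pvGetd3, pvIns3]) <;> try simp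
    have hc : ((k : Int) + 1) = ((k + 1 : Nat) : Int) := by push_cast; ring
    rw [hstep, hc, ih]
    have hl1 : pvS1.length = 5 := rfl
    have hl2 : pvS2.length = 8 := rfl
    have hl3 : pvS3.length = 10 := rfl
    simp only [pvCnt, hl1, hl2, hl3]
    have e5 : (k % 5 + 1) % 5 = (k + 1) % 5 := by omega
    have e8 : (k % 8 + 1) % 8 = (k + 1) % 8 := by omega
    have e10 : (k % 10 + 1) % 10 = (k + 1) % 10 := by omega
    rw [e5, e8, e10]
    simp [add_assoc]

-- ----- B-side lemmas -----

-- a 0/1-sum over range n with exactly one possibly-nonzero position m < n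
theorem pvSumIteSingle (g : Nat → Int) :
    ∀ (n m : Nat), m < n →
    ((List.range n).map (fun r => if r = m then g r else 0)).sum = g m := by
  intro n
  induction n with
  | zero => intro m hm; omega
  | succ n ih =>
    intro m hm
    rw [List.range_succ, List.map_append, List.sum_append]
    rcases eq_or_ne m n with h | h
    · subst h
      have hz : ((List.range m).map (fun r => if r = m then g r else 0)).sum = 0 := by
        apply List.sum_eq_zero
        intro x hx
        rcases List.mem_map.mp hx with ⟨r, hr, hrx⟩
        have : r ≠ m := by have := List.mem_range.mp hr; omega
        simpa [this] using hrx.symm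
      simp [hz]
    · have hm' : m < n := by omega
      rw [ih m hm']
      simp [Ne.symm h]

-- the aggregated histogram count over the 40 residues is exactly the number of hits
theorem pvHistSum (p : List Int) (L : Nat) (hl : p.length = L)
    (h40 : L ∣ 40) :
    ∀ (ans : List Int) (k : Nat),
    ((List.range 40).map (fun r : Nat =>
        ((List.count (((r : Nat) : Int), p.getD (r % L) 0)
            ((PySem.List.enumerate ans (k : Int)).map
              (fun q => (PySem.Int.mod q.1 40, q.2))) : Nat) : Int))).sum
      = pvCnt p (k % L) ans := by
  intro ans
  induction ans with
  | nil =>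
    intro k
    simp [PySem.List.enumerate_nil, pvCnt]
  | cons a t ih =>
    intro k
    rw [PySem.List.enumerate_cons, List.map_cons]
    have hk40 : PySem.Int.mod (k : Int) 40 = ((k % 40 : Nat) : Int) := by
      exact_mod_cast PySem.Int.mod_natCast k 40
    have hc : ((k : Int) + 1) = ((k + 1 : Nat) : Int) := by push_cast; ring
    rw [hk40, hc]
    have hbody : (fun r : Nat =>
          ((List.count (((r : Nat) : Int), p.getD (r % L) 0)
              ((((k % 40 : Nat) : Int), a) ::
                (PySem.List.enumerate t ((k + 1 : Nat) : Int)).map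
                  (fun q => (PySem.Int.mod q.1 40, q.2))) : Nat) : Int))
        = (fun r : Nat =>
          ((List.count (((r : Nat) : Int), p.getD (r % L) 0)
              ((PySem.List.enumerate t ((k + 1 : Nat) : Int)).map
                (fun q => (PySem.Int.mod q.1 40, q.2))) : Nat) : Int)
          + (if r = k % 40 then (if p.getD ((k % 40) % L) 0 = a then 1 else 0) else 0)) := by
      funext r
      rw [List.count_cons, Nat.cast_add]
      congr 1
      simp only [beq_iff_eq, Prod.mk.injEq, Nat.cast_inj]
      by_cases h : r = k % 40
      · subst h; simp [eq_comm]
      · simp [h, Ne.symm h]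
    rw [hbody, PySem.List.sum_map_add_int, ih (k + 1)]
    rw [pvSumIteSingle _ 40 (k % 40) (Nat.mod_lt _ (by norm_num))]
    have hmm : (k % 40) % L = k % L := Nat.mod_mod_of_dvd k h40
    have hstep : (k % L + 1) % L = (k + 1) % L := Nat.mod_add_mod k L 1
    simp only [pvCnt, hl, hmm, hstep]
    ring

-- B's score expression for one pattern equals pvCnt
theorem pvScoreB (p : List Int) (L : Nat) (hl : p.length = L)
    (h40 : L ∣ 40) (ans : List Int) :
    ((PySem.List.pyRange 0 40 1).map (fun r =>
        (((PySem.List.enumerate ans 0).foldl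
            (fun d q =>
              d.insert (PySem.Int.mod q.1 40, q.2)
                (d.getD (PySem.Int.mod q.1 40, q.2) 0 + 1))
    (PySem.Dict.empty : PySem.Dict (Int × Int) Int)).getD
          (r, PySem.List.pyGetD p (PySem.Int.mod r (p.length : Int)) 0) 0))).sum
      = pvCnt p 0 ans := by
  have hrange : PySem.List.pyRange 0 40 1 = (List.range 40).map (fun k : Nat => (k : Int)) := by
    have h := PySem.List.pyRange_zero_natCast 40
    norm_num at h
    exact h
  rw [hrange, List.map_map]
  have hs := pvHistSum p L hl h40 ans 0
  simp only [Nat.cast_zero, Nat.zero_mod] at hs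
  rw [← hs]
  congr 1
  refine List.map_congr_left (fun r hr => ?_)
  simp only [Function.comp_apply]
  rw [← List.foldl_map (f := fun q : Int × Int => (PySem.Int.mod q.1 40, q.2))
        (g := fun d x => PySem.Dict.insert d x (PySem.Dict.getD d x 0 + 1))]
  have hmod : PySem.Int.mod ((r : Nat) : Int) (p.length : Int) = ((r % L : Nat) : Int) := by
    rw [hl]; exact_mod_cast PySem.Int.mod_natCast r L
  rw [hmod, PySem.List.pyGetD_natCast,
    PySem.Dict.getD_foldl_insert_add_one, PySem.Dict.getD_empty]
  simp

-- ===== VERDICT (by name: the statement is the Claim_ definition above) =====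
theorem solution_spec : Claim_equal_solution := by
  intro answers _
  unfold Spec_solution
  simp only [solution, solution_alt]
  have hA := pvStepA_fold answers 0 0 0 0
  simp only [Nat.cast_zero, Nat.zero_mod, zero_add] at hA
  rw [pvOfl, hA]
  rw [List.map_cons, List.map_cons, List.map_cons, List.map_nil]
  simp only [pvScoreB pvS1 5 rfl (by norm_num), pvScoreB pvS2 8 rfl (by norm_num),
      pvScoreB pvS3 10 rfl (by norm_num)]
  set c1 := pvCnt pvS1 0 answers
  set c2 := pvCnt pvS2 0 answers
  set c3 := pvCnt pvS3 0 answers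
  simp only [pvVals]
  rw [show PySem.List.pyRange 0 3 1 = [(0 : Int), 1, 2] by decide]
  simp only [List.foldl_cons, List.foldl_nil]
  simp only [show ∀ a b c : Int, PySem.List.pyGetD [a, b, c] 0 0 = a from fun _ _ _ => rfl,
    show ∀ a b c : Int, PySem.List.pyGetD [a, b, c] 1 0 = b from fun _ _ _ => rfl,
    show ∀ a b c : Int, PySem.List.pyGetD [a, b, c] 2 0 = c from fun _ _ _ => rfl]
  simp only [pvGetd1, pvGetd2, pvGetd3]
  norm_num
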